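-- pv_equiv track=rewrite | github.com/Fox-sys/ege-lessons | lesson_3/homework/f03.py | func
-- ===== SOURCE A (Python) =====
-- def func(x):
--     k = 1
--     a = 0
--     b = 0
--     while x > 0:
--         if x % 10 % 2 == 0:
--             a = a * 10 + x % 10
--         else:
--             k *= 10
--             b = b * 10 + x % 10
--         x = x // 10
--     a = a * k + b
--     return a
-- ===== SOURCE B (Python) =====
-- def func(x):
--     ds = []
--     while x > 0:
--         ds.append(x % 10)
--         x //= 10
--     r = 0
--     for d in [d for d in ds if d % 2 == 0] + [d for d in ds if d % 2 == 1]: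
--         r = r * 10 + d
--     return r
-- ===== Notes on version B (the rewrite author's own statement) =====
-- stated objective: simpler
-- what changed: A interleaves three accumulators (a, b, k) in one digit loop; B first collects the digit list, then filters it into even and odd digits and folds a single Horner pass over their concatenation, dropping the k bookkeeping.
import Mathlib
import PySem

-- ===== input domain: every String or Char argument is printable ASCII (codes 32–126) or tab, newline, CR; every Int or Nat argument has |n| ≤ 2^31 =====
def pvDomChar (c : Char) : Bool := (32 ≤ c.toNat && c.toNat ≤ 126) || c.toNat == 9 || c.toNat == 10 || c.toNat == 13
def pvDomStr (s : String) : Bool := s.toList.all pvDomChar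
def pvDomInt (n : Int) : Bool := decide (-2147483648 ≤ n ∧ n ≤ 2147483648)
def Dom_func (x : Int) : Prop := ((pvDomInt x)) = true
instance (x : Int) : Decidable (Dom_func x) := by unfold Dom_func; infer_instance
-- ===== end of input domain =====

-- B replaces A's three interleaved accumulators with a digit list, two filters and one Horner fold (objective: simpler).

-- ===== PORT A =====
theorem pvFloordiv10_lt (x : Int) (h : 0 < x) : (PySem.Int.floordiv x 10).toNat < x.toNat := by
  rw [PySem.Int.floordiv_eq_ediv_of_pos (by omega)]
  omega

def funcLoop (x k a b : Int) : Int :=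
  if 0 < x then
    if PySem.Int.mod (PySem.Int.mod x 10) 2 = 0 then
      funcLoop (PySem.Int.floordiv x 10) k (a * 10 + PySem.Int.mod x 10) b
    else
      funcLoop (PySem.Int.floordiv x 10) (k * 10) a (b * 10 + PySem.Int.mod x 10)
  else a * k + b
termination_by x.toNat
decreasing_by all_goals exact pvFloordiv10_lt x (by assumption)

def func (x : Int) : Int := funcLoop x 1 0 0

-- ===== PORT B =====
def digitsLoop (x : Int) (ds : List Int) : List Int :=
  if 0 < x then digitsLoop (PySem.Int.floordiv x 10) (ds ++ [PySem.Int.mod x 10]) else ds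
termination_by x.toNat
decreasing_by exact pvFloordiv10_lt x (by assumption)

def func_alt (x : Int) : Int :=
  let ds := digitsLoop x []
  ((ds.filter (fun d => PySem.Int.mod d 2 = 0)) ++ (ds.filter (fun d => PySem.Int.mod d 2 = 1))).foldl
    (fun r d => r * 10 + d) 0

-- ===== PRECONDITION & SPEC =====
def Spec_func (x : Int) (out : Int) : Prop := out = func_alt x
instance (x : Int) (out : Int) : Decidable (Spec_func x out) := by unfold Spec_func; infer_instance

-- ===== CLAIM (what is proved, stated in full; the proofs are below) =====
def Claim_equal_func : Prop := ∀ (x : Int), Dom_func x → Spec_func x (func x)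

-- ===== LEMMAS AND PROOFS =====

-- digits of x, least-significant first (proof-side characterisation of digitsLoop)
def digitsRec (x : Int) : List Int :=
  if 0 < x then PySem.Int.mod x 10 :: digitsRec (PySem.Int.floordiv x 10) else []
termination_by x.toNat
decreasing_by exact pvFloordiv10_lt x (by assumption)

theorem digitsLoop_eq (x : Int) : ∀ ds : List Int, digitsLoop x ds = ds ++ digitsRec x := by
  induction x using digitsRec.induct with
  | case1 x h ih =>
      intro ds
      rw [digitsLoop, digitsRec, if_pos h, if_pos h, ih, List.append_assoc]; rfl
  | case2 x h =>
      intro ds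
      rw [digitsLoop, digitsRec, if_neg h, if_neg h, List.append_nil]

theorem foldl_horner (l : List Int) (a : Int) :
    l.foldl (fun r d => r * 10 + d) a = a * 10 ^ l.length + l.foldl (fun r d => r * 10 + d) 0 := by
  induction l generalizing a with
  | nil => simp
  | cons d l ih =>
      simp only [List.foldl_cons, List.length_cons]
      rw [ih (a * 10 + d), ih (0 * 10 + d)]
      ring

theorem funcLoop_eq (x k a b : Int) :
    funcLoop x k a b =
      ((digitsRec x).filter (fun d => PySem.Int.mod d 2 = 0)).foldl (fun r d => r * 10 + d) a
        * (k * 10 ^ ((digitsRec x).filter (fun d => PySem.Int.mod d 2 = 1)).length)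
      + ((digitsRec x).filter (fun d => PySem.Int.mod d 2 = 1)).foldl (fun r d => r * 10 + d) b := by
  induction x, k, a, b using funcLoop.induct with
  | case1 x k a b h heven ih =>
      have hodd : ¬ PySem.Int.mod (PySem.Int.mod x 10) 2 = 1 := by
        rw [heven]; decide
      rw [funcLoop, if_pos h, if_pos heven, digitsRec, if_pos h, ih]
      simp only [List.filter_cons, heven]
      simp
  | case2 x k a b h hodd ih =>
      have h1 : PySem.Int.mod (PySem.Int.mod x 10) 2 = 1 := by
        have := PySem.Int.mod_two_eq (PySem.Int.mod x 10)
        rcases this with h' | h' <;> simp_all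
      rw [funcLoop, if_pos h, if_neg hodd, digitsRec, if_pos h, ih]
      simp only [List.filter_cons, h1]
      simp only [decide_true, if_true, List.foldl_cons, List.length_cons, show (decide ((1:Int) = 0)) = false from rfl, Bool.false_eq_true, if_false]
      ring
  | case3 x k a b h =>
      rw [funcLoop, if_neg h, digitsRec, if_neg h]
      simp

-- ===== VERDICT (by name: the statement is the Claim_ definition above) =====
theorem func_spec : Claim_equal_func := by
  intro x _
  unfold Spec_func func func_alt
  rw [funcLoop_eq, digitsLoop_eq]
  simp only [List.nil_append, List.foldl_append]
  conv_rhs => rw [foldl_horner]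
  ring
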